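-- pv_equiv track=rewrite | github.com/cucker0/dockerfile | get_command_4_run_container/py/parse_container_inspect.py | camel2connector
-- ===== SOURCE A (Python) =====
-- def camel2connector(s: str):
--     """驼峰字符串转连接字符格式。
--
--     DriverOpts -> driver-opt
--
--     :param s:
--     :return:
--     """
--     if len(s) <= 1:
--         return s.lower()
--
--     s_list = list(s)
--     for i in range(len(s_list)):
--         if i != 0 and ('A' <= s_list[i] <= 'Z'):
--             s_list[i] = s_list[i].lower()
--             s_list.insert(i, '-')
--     ss = "".join(s_list).lower()
--     if ss.endswith("s"):
--         ss = ss[:-1]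
--
--     return ss
-- ===== SOURCE B (Python) =====
-- def camel2connector(s: str):
--     """Camel string to connector format: DriverOpts -> driver-opt."""
--     if len(s) <= 1:
--         return s.lower()
--     out = []
--     for i, c in enumerate(s):
--         if i != 0 and 'A' <= c <= 'Z':
--             out.append('-')
--         out.append(c)
--     ss = "".join(out).lower()
--     if ss.endswith("s"):
--         ss = ss[:-1]
--     return ss
-- ===== Notes on version B (the rewrite author's own statement) =====
-- stated objective: simpler
-- what changed: B builds the result in one immutable forward pass (emit '-' before each interior capital, then lowercase and strip one trailing 's') instead of A's index loop over a list it mutates with insert(), whose shifts make the scan stop early.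
-- intended difference: On strings whose t-th interior capital sits at 0-based position i with i + t > len(s), A's insert() shifts push that capital past the range(len(s)) scan so A silently drops its dash (A('ABCD') = 'a-b-cd'); B returns the full hyphenation 'a-b-c-d', which is the intended camel-to-connector value. — e.g. on camel2connector("aAA"): A returns "a-aa", B returns "a-a-a"
import Mathlib
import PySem

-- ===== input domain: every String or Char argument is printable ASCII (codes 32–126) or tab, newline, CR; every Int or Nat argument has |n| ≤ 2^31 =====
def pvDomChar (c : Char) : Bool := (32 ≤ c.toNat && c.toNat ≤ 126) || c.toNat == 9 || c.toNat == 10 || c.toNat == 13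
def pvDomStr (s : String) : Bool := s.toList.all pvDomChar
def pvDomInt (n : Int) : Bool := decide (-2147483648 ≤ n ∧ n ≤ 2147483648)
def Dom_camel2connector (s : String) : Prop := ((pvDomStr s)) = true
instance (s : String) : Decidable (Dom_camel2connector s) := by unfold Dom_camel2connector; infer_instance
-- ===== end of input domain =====

-- B is the natural one-pass rewrite (emit '-' before each interior capital); A drops dashes
-- when its in-place insert() shifts push later capitals past the scanned range (see D_ below).

-- ===== PORT A =====
-- one iteration of A's 'for i in range(len(s_list))' body, mutating the char list
def camelStep (l : List Char) (i : Int) : List Char :=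
  match PySem.List.pyGet? l i with
  | some c =>
    if i ≠ 0 ∧ ('A' ≤ c ∧ c ≤ 'Z') then
      PySem.List.insert (PySem.List.pySetD l i (PySem.Chars.lowerChar c)) i '-'
    else l
  | none => l

def camel2connector (s : String) : String :=
  if PySem.Str.len s ≤ 1 then PySem.Str.lower s
  else
    let sList := s.toList
    let l := (PySem.List.pyRange 0 (sList.length : Int)).foldl camelStep sList
    let ss := PySem.Chars.lower l
    let ss := if PySem.Chars.endswith ss ['s'] then PySem.List.slice ss none (some (-1)) else ss
    String.ofList ss

-- ===== PORT B =====
-- Source B's loop body: the chunk appended for one enumerated character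
def altItem (ic : Int × Char) : List Char :=
  if ic.1 ≠ 0 ∧ ('A' ≤ ic.2 ∧ ic.2 ≤ 'Z') then ['-', ic.2] else [ic.2]

def camel2connector_alt (s : String) : String :=
  if PySem.Str.len s ≤ 1 then PySem.Str.lower s
  else
    let cs := s.toList
    let out := (PySem.List.enumerate cs).foldl (fun acc ic => acc ++ altItem ic) []
    let ss := PySem.Chars.lower out
    let ss := if PySem.Chars.endswith ss ['s'] then PySem.List.slice ss none (some (-1)) else ss
    String.ofList ss

-- ===== PRECONDITION & SPEC =====
def isUpAZ (c : Char) : Bool := decide (65 ≤ c.toNat ∧ c.toNat ≤ 90)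

-- On strings where the t-th interior capital sits at 0-based position i with i + t > len(s),
-- A's insert() shifts push that capital past the range(len(s)) scan, so A silently drops its
-- dash (e.g. 'ABCD' -> 'a-b-cd'); B returns the intended full hyphenation ('a-b-c-d').
-- (i + t is increasing in t, so the condition reads off the LAST interior capital:
-- more interior capitals than trailing non-capitals plus one.)
def D_camel2connector (s : String) : Prop :=
  ((s.toList.drop 1).reverse.takeWhile (fun c => !isUpAZ c)).length + 1 <
    (s.toList.drop 1).countP isUpAZ
instance (s : String) : Decidable (D_camel2connector s) := by unfold D_camel2connector; infer_instance

def Spec_camel2connector (s : String) (out : String) : Prop :=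
  ¬ D_camel2connector s → out = camel2connector_alt s
instance (s : String) (out : String) : Decidable (Spec_camel2connector s out) := by unfold Spec_camel2connector; infer_instance

def pvDiffWitness_camel2connector : String := "aAA"
def pvDiffWitnessOut_camel2connector : String × String := ("a-aa", "a-a-a")

-- ===== CLAIM (what is proved, stated in full; the proofs are below) =====
def Claim_unchanged_camel2connector : Prop :=
  ∀ (s : String), Dom_camel2connector s → Spec_camel2connector s (camel2connector s)
def Claim_changed_camel2connector : Prop :=
  Dom_camel2connector (pvDiffWitness_camel2connector) ∧
  D_camel2connector (pvDiffWitness_camel2connector) ∧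
  camel2connector (pvDiffWitness_camel2connector) = pvDiffWitnessOut_camel2connector.1 ∧
  camel2connector_alt (pvDiffWitness_camel2connector) = pvDiffWitnessOut_camel2connector.2 ∧
  pvDiffWitnessOut_camel2connector.1 ≠ pvDiffWitnessOut_camel2connector.2

-- ===== LEMMAS AND PROOFS =====

-- ---- A-side: the fold over range equals a budget loop (j = source index, k = dashes so far) ----

def altLoop (cs : List Char) (j k : Nat) : List Char :=
  if h : j + k + 1 ≤ cs.length then
    let c := cs[j]'(by omega)
    if j + k ≠ 0 ∧ ('A' ≤ c ∧ c ≤ 'Z') then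
      '-' :: PySem.Chars.lowerChar c :: altLoop cs (j + 1) (k + 1)
    else
      c :: altLoop cs (j + 1) k
  else cs.drop j
termination_by cs.length - j

-- the D_ predicate's code-point test is the A..Z range test
lemma isUpAZ_iff (c : Char) : isUpAZ c = true ↔ ('A' ≤ c ∧ c ≤ 'Z') := by
  rw [isUpAZ, decide_eq_true_eq, Char.le_def, Char.le_def,
    UInt32.le_iff_toNat_le, UInt32.le_iff_toNat_le]
  have h1 : ('A' : Char).val.toNat = 65 := by decide
  have h2 : ('Z' : Char).val.toNat = 90 := by decide
  rw [h1, h2]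
  rfl

-- lowering an uppercase letter leaves the A..Z range
lemma lowerChar_not_upper (c : Char) (h : 'A' ≤ c ∧ c ≤ 'Z') :
    ¬ ('A' ≤ PySem.Chars.lowerChar c ∧ PySem.Chars.lowerChar c ≤ 'Z') := by
  obtain ⟨h1, h2⟩ := h
  have h1' : 65 ≤ c.toNat := Nat.succ_le_of_lt h1
  have h2' : c.toNat ≤ 90 := Nat.le_of_lt_succ (Nat.lt_succ_of_le h2)
  have hup : PySem.Chars.isupper c = true := by
    simp [PySem.Chars.isupper]; constructor <;> assumption
  simp only [PySem.Chars.lowerChar, hup, if_pos]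
  have hv : (Char.ofNat (c.toNat + 32)).toNat = c.toNat + 32 := by
    simp [Char.toNat_ofNat, Nat.isValidChar]
    omega
  rintro ⟨-, hle⟩
  have h3 : (Char.ofNat (c.toNat + 32)).toNat ≤ 90 := Nat.le_of_lt_succ (Nat.lt_succ_of_le hle)
  omega

lemma pyRange_one_nil (a b : Int) (h : b ≤ a) : PySem.List.pyRange a b = [] := by
  rw [PySem.List.pyRange_one]
  have : (b - a).toNat = 0 := by omega
  simp [this]

-- the element A's loop body reads at index j+k of prefix ++ cs[j:] is cs[j]
lemma get_mid (P rest : List Char) (c : Char) (m : Nat) (hP : P.length = m) :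
    (P ++ c :: rest)[m]? = some c := by
  subst hP
  rw [List.getElem?_append_right (le_refl _)]
  simp

-- the fold over the remaining indices, started from emitted-prefix ++ untouched-suffix, is prefix ++ the budget loop
lemma loop_eq (cs : List Char) : ∀ (d j k : Nat) (P : List Char),
    P.length = j + k → j ≤ cs.length → cs.length ≤ j + k + d →
    (PySem.List.pyRange ((j + k : Nat) : Int) (cs.length : Int)).foldl camelStep (P ++ cs.drop j)
      = P ++ altLoop cs j k := by
  intro d
  induction d with
  | zero =>
    intro j k P hP hj hn
    rw [pyRange_one_nil _ _ (by exact_mod_cast hn)]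
    rw [altLoop, dif_neg (by omega)]
    rfl
  | succ d ih =>
    intro j k P hP hj hn
    by_cases hlt : j + k < cs.length
    · have hjlt : j < cs.length := by omega
      have hdrop : cs.drop j = cs[j] :: cs.drop (j + 1) := List.drop_eq_getElem_cons hjlt
      set c := cs[j] with hc
      rw [PySem.List.pyRange_one_cons (by exact_mod_cast hlt)]
      rw [List.foldl_cons]
      have hstep : camelStep (P ++ cs.drop j) ((j + k : Nat) : Int) =
          if (j + k ≠ 0) ∧ ('A' ≤ c ∧ c ≤ 'Z') then
            P ++ '-' :: PySem.Chars.lowerChar c :: cs.drop (j + 1)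
          else P ++ cs.drop j := by
        rw [camelStep, PySem.List.pyGet?_natCast, hdrop, get_mid _ _ _ _ hP]
        dsimp only
        by_cases hcond : (j + k ≠ 0) ∧ ('A' ≤ c ∧ c ≤ 'Z')
        · rw [if_pos hcond, if_pos (by exact_mod_cast hcond)]
          rw [PySem.List.pySetD_natCast]
          have hset : (P ++ c :: cs.drop (j + 1)).set (j + k) (PySem.Chars.lowerChar c)
              = P ++ PySem.Chars.lowerChar c :: cs.drop (j + 1) := by
            rw [← hP, List.set_append_right _ _ (le_refl _)]
            simp
          rw [hset]
          rw [PySem.List.insert_natCast _ _ _ (by simp; omega)]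
          rw [← hP, List.take_left, List.drop_left]
        · rw [if_neg hcond, if_neg (by
            intro hcont
            exact hcond ⟨by exact_mod_cast hcont.1, hcont.2⟩), ← hdrop]
      rw [hstep]
      by_cases hcond : (j + k ≠ 0) ∧ ('A' ≤ c ∧ c ≤ 'Z')
      · rw [if_pos hcond]
        have haltjk : altLoop cs j k = '-' :: PySem.Chars.lowerChar c :: altLoop cs (j + 1) (k + 1) := by
          rw [altLoop, dif_pos (by omega), ← hc, if_pos hcond]
        by_cases h2 : j + k + 1 < cs.length
        · rw [PySem.List.pyRange_one_cons (by exact_mod_cast h2)]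
          rw [List.foldl_cons]
          have hre : P ++ '-' :: PySem.Chars.lowerChar c :: cs.drop (j + 1)
              = (P ++ ['-']) ++ PySem.Chars.lowerChar c :: cs.drop (j + 1) := by simp
          have hnoop : camelStep (P ++ '-' :: PySem.Chars.lowerChar c :: cs.drop (j + 1))
              (((j + k : Nat) : Int) + 1)
              = P ++ '-' :: PySem.Chars.lowerChar c :: cs.drop (j + 1) := by
            rw [camelStep]
            have hcast : (((j + k : Nat) : Int) + 1) = ((j + k + 1 : Nat) : Int) := by push_cast; ring
            rw [hcast, PySem.List.pyGet?_natCast, hre,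
              get_mid _ _ _ _ (by simp [hP])]
            dsimp only
            rw [if_neg (by
              rintro ⟨-, hup⟩
              exact lowerChar_not_upper c hcond.2 hup)]
          rw [hnoop]
          have hcast2 : (((j + k : Nat) : Int) + 1 + 1) = (((j + 1) + (k + 1) : Nat) : Int) := by
            push_cast; ring
          have hre2 : P ++ '-' :: PySem.Chars.lowerChar c :: cs.drop (j + 1)
              = (P ++ ['-', PySem.Chars.lowerChar c]) ++ cs.drop (j + 1) := by simp
          rw [hcast2, hre2, ih (j + 1) (k + 1) _ (by simp only [List.length_append, List.length_cons, List.length_nil, hP]; omega) (by omega) (by omega)]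
          rw [haltjk]
          simp
        · have hlen : cs.length = j + k + 1 := by omega
          rw [pyRange_one_nil _ _ (by push_cast; omega)]
          rw [haltjk, altLoop, dif_neg (by omega)]
          simp
      · rw [if_neg hcond]
        have haltjk : altLoop cs j k = c :: altLoop cs (j + 1) k := by
          rw [altLoop, dif_pos (by omega), ← hc, if_neg hcond]
        have hcast2 : (((j + k : Nat) : Int) + 1) = (((j + 1) + k : Nat) : Int) := by
          push_cast; ring
        have hre : P ++ cs.drop j = (P ++ [c]) ++ cs.drop (j + 1) := by
          rw [hdrop]; simp
        rw [hcast2, hre, ih (j + 1) k _ (by simp only [List.length_append, List.length_cons, List.length_nil, hP]; omega) (by omega) (by omega)]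
        rw [haltjk]
        simp
    · rw [pyRange_one_nil _ _ (by exact_mod_cast (by omega : cs.length ≤ j + k))]
      rw [altLoop, dif_neg (by omega)]
      rfl

-- ---- B-side: the enumerate fold as a structural emitter ----

def emitFrom (l : List Char) (j : Nat) : List Char :=
  match l with
  | [] => []
  | c :: t => (if j ≠ 0 ∧ ('A' ≤ c ∧ c ≤ 'Z') then ['-', c] else [c]) ++ emitFrom t (j + 1)

lemma flatMap_altItem (l : List Char) : ∀ (j : Nat),
    (PySem.List.enumerate l (j : Int)).flatMap altItem = emitFrom l j := by
  induction l with
  | nil => intro j; simp [PySem.List.enumerate_nil, emitFrom]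
  | cons c t ih =>
    intro j
    rw [PySem.List.enumerate_cons, List.flatMap_cons]
    have : ((j : Int) + 1) = ((j + 1 : Nat) : Int) := by push_cast; ring
    rw [this, ih (j + 1)]
    rw [emitFrom]
    congr 1
    simp only [altItem]
    by_cases h : j ≠ 0 ∧ ('A' ≤ c ∧ c ≤ 'Z')
    · rw [if_pos ⟨by exact_mod_cast h.1, h.2⟩, if_pos h]
    · rw [if_neg (by rintro ⟨h1, h2⟩; exact h ⟨by exact_mod_cast h1, h2⟩), if_neg h]

-- lowerChar is idempotent
lemma lowerChar_idem (c : Char) :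
    PySem.Chars.lowerChar (PySem.Chars.lowerChar c) = PySem.Chars.lowerChar c := by
  by_cases hup : PySem.Chars.isupper c = true
  · have hrange : 'A' ≤ c ∧ c ≤ 'Z' := by
      simpa [PySem.Chars.isupper] using hup
    have h2 := lowerChar_not_upper c hrange
    have hnotup : PySem.Chars.isupper (PySem.Chars.lowerChar c) = false := by
      rw [PySem.Chars.isupper]
      simp only [Bool.and_eq_false_iff, decide_eq_false_iff_not]
      tauto
    rw [PySem.Chars.lowerChar, hnotup]
    simp
  · have : PySem.Chars.lowerChar c = c := by
      rw [PySem.Chars.lowerChar, eq_false_of_ne_true hup]; simp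
    rw [this, this]

lemma lower_cons (c : Char) (l : List Char) :
    PySem.Chars.lower (c :: l) = PySem.Chars.lowerChar c :: PySem.Chars.lower l := by
  simp [PySem.Chars.lower]

-- an uppercase-free suffix is emitted unchanged
lemma emitFrom_no_upper (l : List Char) : ∀ (j : Nat),
    (∀ c ∈ l, ¬ ('A' ≤ c ∧ c ≤ 'Z')) → emitFrom l j = l := by
  induction l with
  | nil => intro j _; rfl
  | cons c t ih =>
    intro j h
    rw [emitFrom, if_neg (by rintro ⟨-, hc⟩; exact h c (by simp) hc), ih (j + 1) (fun x hx => h x (by simp [hx]))]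
    rfl

-- outside D_, the capitals before any interior capital are bounded by the room after it
lemma noStall_bound (cs' : List Char) (p : Nat) (hp : p < cs'.length)
    (hcap : isUpAZ (cs'[p]'hp) = true)
    (hD : ¬ ((cs'.reverse.takeWhile (fun c => !isUpAZ c)).length + 1 < cs'.countP isUpAZ)) :
    (cs'.take p).countP isUpAZ + p + 1 ≤ cs'.length := by
  set t := (cs'.reverse.takeWhile (fun c => !isUpAZ c)).length with ht
  -- the full count exceeds the prefix count (the capital at p is in the suffix)
  have hsplit : cs'.countP isUpAZ
      = (cs'.take p).countP isUpAZ + (cs'.drop p).countP isUpAZ := by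
    conv_lhs => rw [← List.take_append_drop p cs']
    rw [List.countP_append]
  have hdropc : cs'.drop p = cs'[p] :: cs'.drop (p + 1) := List.drop_eq_getElem_cons hp
  have h1 : (cs'.take p).countP isUpAZ + 1 ≤ cs'.countP isUpAZ := by
    rw [hsplit, hdropc, List.countP_cons, hcap]
    simp only [if_true]
    omega
  -- the trailing non-capital run stops at or before the capital at p
  have h2 : t ≤ cs'.length - 1 - p := by
    by_contra hcon
    push Not at hcon
    have hidx : cs'.length - 1 - p < t := hcon
    have hpre : cs'.reverse.takeWhile (fun c => !isUpAZ c) <+: cs'.reverse :=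
      List.takeWhile_prefix _
    have hlt' : cs'.length - 1 - p < cs'.reverse.length := by
      rw [List.length_reverse]; omega
    have hget : (cs'.reverse.takeWhile (fun c => !isUpAZ c))[cs'.length - 1 - p]'(by rw [← ht]; exact hidx)
        = cs'.reverse[cs'.length - 1 - p]'hlt' := hpre.getElem _
    have hmem := List.mem_takeWhile_imp
      (List.getElem_mem (l := cs'.reverse.takeWhile (fun c => !isUpAZ c))
        (n := cs'.length - 1 - p) (by rw [← ht]; exact hidx))
    rw [hget] at hmem
    rw [List.getElem_reverse] at hmem
    have hsame : cs'.length - 1 - (cs'.length - 1 - p) = p := by omega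
    simp only [hsame] at hmem
    rw [hcap] at hmem
    simp at hmem
  push Not at hD
  omega

-- ---- the core: outside the stall condition, the budget loop lowers to B's emitter ----

lemma loopB (cs : List Char) : ∀ (d j k : Nat), 1 ≤ j → cs.length ≤ j + d →
    (∀ i, (hi : i < cs.length) → j ≤ i → ('A' ≤ cs[i] ∧ cs[i] ≤ 'Z') →
      i + k + 1 + ((cs.drop j).take (i - j)).countP isUpAZ ≤ cs.length) →
    PySem.Chars.lower (altLoop cs j k) = PySem.Chars.lower (emitFrom (cs.drop j) j) := by
  intro d
  induction d with
  | zero =>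
    intro j k hj hn H
    have hdrop : cs.drop j = [] := List.drop_eq_nil_of_le (by omega)
    rw [altLoop, dif_neg (by omega), hdrop, emitFrom]
  | succ d ih =>
    intro j k hj hn H
    by_cases hg : j + k + 1 ≤ cs.length
    · have hjlt : j < cs.length := by omega
      have hdrop : cs.drop j = cs[j] :: cs.drop (j + 1) := List.drop_eq_getElem_cons hjlt
      set c := cs[j] with hc
      have hsplit : ∀ i, j + 1 ≤ i → i ≤ cs.length →
          (cs.drop j).take (i - j) = c :: (cs.drop (j + 1)).take (i - (j + 1)) := by
        intro i h1 h2
        rw [hdrop]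
        have : i - j = (i - (j + 1)) + 1 := by omega
        rw [this, List.take_succ_cons]
      by_cases hcond : ('A' ≤ c ∧ c ≤ 'Z')
      · have hAcond : j + k ≠ 0 ∧ ('A' ≤ c ∧ c ≤ 'Z') := ⟨by omega, hcond⟩
        rw [altLoop, dif_pos hg, ← hc, if_pos hAcond]
        rw [hdrop, emitFrom, if_pos ⟨by omega, hcond⟩]
        simp only [List.cons_append, List.nil_append]
        rw [lower_cons, lower_cons, lower_cons, lower_cons, lowerChar_idem]
        congr 1
        congr 1
        rw [ih (j + 1) (k + 1) (by omega) (by omega)]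
        intro i hi hge hup
        have hH := H i hi (by omega) hup
        have hne : i ≠ j := by
          intro he; subst he
          have := H i hi (le_refl _) hup
          simp at this
          omega
        have hge' : j + 1 ≤ i := by omega
        rw [hsplit i hge' (by omega)] at hH
        have hcU : isUpAZ c = true := (isUpAZ_iff c).mpr hcond
        simp only [List.countP_cons, hcU, if_true] at hH
        omega
      · rw [altLoop, dif_pos hg, ← hc, if_neg (by rintro ⟨-, hx⟩; exact hcond hx)]
        rw [hdrop, emitFrom, if_neg (by rintro ⟨-, hx⟩; exact hcond hx)]
        simp only [List.cons_append, List.nil_append]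
        rw [lower_cons, lower_cons]
        congr 1
        rw [ih (j + 1) k (by omega) (by omega)]
        intro i hi hge hup
        have hne : i ≠ j := by
          intro he; subst he; exact hcond hup
        have hge' : j + 1 ≤ i := by omega
        have hH := H i hi (by omega) hup
        rw [hsplit i hge' (by omega)] at hH
        have hcU : isUpAZ c = false :=
          Bool.eq_false_iff.mpr (fun hx => hcond ((isUpAZ_iff c).mp hx))
        simp only [List.countP_cons, hcU, Bool.false_eq_true, if_false, Nat.add_zero] at hH
        omega
    · rw [altLoop, dif_neg hg]
      rw [emitFrom_no_upper _ j]
      intro x hx hup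
      obtain ⟨m, hm, he⟩ := List.mem_iff_getElem.mp hx
      have hlen : (cs.drop j).length = cs.length - j := List.length_drop ..
      have hget : (cs.drop j)[m] = cs[j + m]'(by omega) := List.getElem_drop ..
      have := H (j + m) (by omega) (by omega) (by rw [← he, hget] at hup; exact hup)
      omega

-- A's fold equals the budget loop from (0,0); B's fold equals emitFrom from 0; glue at the first char
theorem ports_agree (s : String) (hD : ¬ D_camel2connector s) :
    camel2connector s = camel2connector_alt s := by
  rw [camel2connector, camel2connector_alt]
  by_cases h : PySem.Str.len s ≤ 1
  · rw [if_pos h, if_pos h]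
  · rw [if_neg h, if_neg h]
    dsimp only
    set cs := s.toList with hcs
    have hlen : cs.length = s.length := by rw [hcs]; exact String.length_toList
    have hn2 : 2 ≤ cs.length := by
      have h' : ¬ ((s.length : Int) ≤ 1) := by simpa [PySem.Str.len, PySem.Chars.len] using h
      omega
    -- A's fold
    have hloop := loop_eq cs cs.length 0 0 [] (by simp) (by omega) (by omega)
    simp only [List.nil_append, List.drop_zero, Nat.add_zero, Nat.cast_zero] at hloop
    rw [hloop]
    -- B's fold
    have hB : (PySem.List.enumerate cs).foldl (fun acc ic => acc ++ altItem ic) []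
        = emitFrom cs 0 := by
      rw [PySem.List.foldl_append_eq_flatMap]
      have h0 : ((0 : Nat) : Int) = (0 : Int) := by norm_num
      rw [List.nil_append, ← h0, flatMap_altItem]
    rw [hB]
    -- first char on both sides, then loopB
    have h0lt : 0 < cs.length := by omega
    have hcons : cs = cs[0] :: cs.drop 1 := by
      simpa using List.drop_eq_getElem_cons h0lt
    have hA0 : altLoop cs 0 0 = cs[0] :: altLoop cs 1 0 := by
      rw [altLoop, dif_pos (by omega)]
      simp
    have hB0 : emitFrom cs 0 = cs[0] :: emitFrom (cs.drop 1) 1 := by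
      conv_lhs => rw [hcons]
      rw [emitFrom]
      simp
    have hlower : PySem.Chars.lower (altLoop cs 0 0) = PySem.Chars.lower (emitFrom cs 0) := by
      rw [hA0, hB0, lower_cons, lower_cons]
      congr 1
      apply loopB cs cs.length 1 0 (le_refl _) (by omega)
      -- ¬ D_ gives the no-stall bound at every interior capital
      intro i hi hge hup
      have hD' : ¬ (((cs.drop 1).reverse.takeWhile (fun c => !isUpAZ c)).length + 1 <
          (cs.drop 1).countP isUpAZ) := by
        intro hx
        exact hD (by unfold D_camel2connector; rw [← hcs]; exact hx)
      have hmlt : i - 1 < (cs.drop 1).length := by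
        rw [List.length_drop]; omega
      have hget : (cs.drop 1)[i - 1]'hmlt = cs[i] := by
        rw [List.getElem_drop]
        congr 1
        omega
      have hb := noStall_bound (cs.drop 1) (i - 1) hmlt
        (by rw [hget]; exact (isUpAZ_iff _).mpr hup) hD'
      rw [List.length_drop] at hb
      omega
    rw [hlower]

-- ===== VERDICT (by name: the statement is the Claim_ definition above) =====
theorem camel2connector_spec : Claim_unchanged_camel2connector := by
  intro s _ hD
  exact ports_agree s hD

set_option maxHeartbeats 1000000 in
theorem camel2connector_changed : Claim_changed_camel2connector := by
  unfold Claim_changed_camel2connector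
  decide
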